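-- pv_equiv track=rewrite | github.com/Matthew-Pidlysny/Empirinometry | Program-Bin/MFT/Bin/Induction/bin/numerical_variation.py | _find_modular_period
-- ===== SOURCE A (Python) =====
-- from typing import List, Dict, Any, Tuple, Optional, Generator
--
-- def _find_modular_period(residues: List[int], max_period: int) -> int:
--     """Find period of residues"""
--
--     if len(residues) < 4:
--         return 1
--
--     for period in range(1, min(max_period, len(residues) // 2)):
--         is_period = True
--         for i in range(len(residues) - period):
--             if residues[i] != residues[i + period]:
--                 is_period = False
--                 break
--         if is_period:
--             return period
--
--     return len(residues)  # No period found
-- ===== SOURCE B (Python) =====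
-- def _find_modular_period(residues, max_period):
--     """Find period of residues (KMP prefix function: minimal period = n - longest proper border)."""
--     n = len(residues)
--     if n < 4:
--         return 1
--     pi = [0] * n
--     k = 0
--     for i in range(1, n):
--         while k > 0 and residues[i] != residues[k]:
--             k = pi[k - 1]
--         if residues[i] == residues[k]:
--             k += 1
--         pi[i] = k
--     p = n - pi[n - 1]
--     return p if p < min(max_period, n // 2) else n
-- ===== Notes on version B (the rewrite author's own statement) =====
-- stated objective: alternative
-- what changed: Replaces A's nested scan over all candidate periods (each verified element-by-element) with the KMP prefix/failure function: the minimal period is n minus the longest proper border, computed in one left-to-right pass, then checked against the bound.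
import Mathlib
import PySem

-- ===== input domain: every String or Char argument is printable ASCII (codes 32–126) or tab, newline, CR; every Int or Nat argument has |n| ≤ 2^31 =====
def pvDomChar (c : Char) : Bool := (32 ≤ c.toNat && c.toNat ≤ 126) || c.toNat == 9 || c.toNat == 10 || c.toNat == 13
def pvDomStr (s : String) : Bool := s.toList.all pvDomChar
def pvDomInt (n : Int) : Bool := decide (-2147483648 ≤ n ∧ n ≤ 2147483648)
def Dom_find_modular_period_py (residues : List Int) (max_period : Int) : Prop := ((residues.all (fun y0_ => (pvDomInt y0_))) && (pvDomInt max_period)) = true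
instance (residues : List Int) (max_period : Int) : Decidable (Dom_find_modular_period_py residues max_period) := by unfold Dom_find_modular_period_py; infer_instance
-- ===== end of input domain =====

-- B computes the minimal period via the KMP prefix function (minimal period = n − longest proper border,
-- one left-to-right pass) instead of A's trial of each candidate period with an inner element scan.

-- ===== PORT A =====
-- inner loop: for i in range(len(residues) - period): if residues[i] != residues[i+period]: break
def pvAInner (residues : List Int) (period : Int) : List Int → Bool
  | [] => true
  | i :: rest =>
      if PySem.List.pyGetD residues i 0 ≠ PySem.List.pyGetD residues (i + period) 0 then false
      else pvAInner residues period rest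

-- outer loop: for period in range(1, min(max_period, len(residues)//2)): … return period / fall through to len
def pvAOuter (residues : List Int) : List Int → Int
  | [] => (residues.length : Int)
  | p :: rest =>
      if pvAInner residues p (PySem.List.pyRange 0 ((residues.length : Int) - p) 1) then p
      else pvAOuter residues rest

def find_modular_period_py (residues : List Int) (max_period : Int) : Int :=
  if residues.length < 4 then 1
  else pvAOuter residues
        (PySem.List.pyRange 1 (min max_period (PySem.Int.floordiv (residues.length : Int) 2)) 1)

-- ===== PORT B =====
-- while k > 0 and residues[i] != residues[k]: k = pi[k-1]   ('min … k' is only a totality guard;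
-- under the loop invariant pi[k-1] ≤ k-1 it is the identity)
def pvJump (residues : List Int) (pi : List Nat) (x : Int) : Nat → Nat
  | 0 => 0
  | k + 1 =>
      if x = residues.getD (k + 1) 0 then k + 1
      else pvJump residues pi x (min (pi.getD k 0) k)
  termination_by k => k
  decreasing_by omega

-- body of 'for i in range(1, n)': state = (pi built so far, k)
def pvKmpStep (residues : List Int) (st : List Nat × Nat) (i : Nat) : List Nat × Nat :=
  let x := residues.getD i 0
  let j := pvJump residues st.1 x st.2
  let k' := if x = residues.getD j 0 then j + 1 else j
  (st.1 ++ [k'], k')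

def find_modular_period_py_alt (residues : List Int) (max_period : Int) : Int :=
  let n := residues.length
  if n < 4 then 1
  else
    let pi := ((List.range' 1 (n - 1)).foldl (pvKmpStep residues) ([0], 0)).1
    let p : Int := (n : Int) - (pi.getD (n - 1) 0 : Nat)
    if p < min max_period (PySem.Int.floordiv (n : Int) 2) then p else (n : Int)

-- ===== PRECONDITION & SPEC =====
def Spec_find_modular_period_py (residues : List Int) (max_period : Int) (out : Int) : Prop := out = find_modular_period_py_alt residues max_period
instance (residues : List Int) (max_period : Int) (out : Int) : Decidable (Spec_find_modular_period_py residues max_period out) := by unfold Spec_find_modular_period_py; infer_instance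

-- ===== CLAIM (what is proved, stated in full; the proofs are below) =====
def Claim_equal_find_modular_period_py : Prop := ∀ (residues : List Int) (max_period : Int), Dom_find_modular_period_py residues max_period → Spec_find_modular_period_py residues max_period (find_modular_period_py residues max_period)

-- ===== LEMMAS AND PROOFS =====

-- k is a (proper) border of l: the length-k prefix equals the length-k suffix
def IsBorder (l : List Int) (k : Nat) : Prop := k < l.length ∧ l.take k = l.drop (l.length - k)

-- length of the longest proper border
def maxBorder (l : List Int) : Nat :=
  Nat.findGreatest (fun k => (l.take k == l.drop (l.length - k)) = true) (l.length - 1)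

theorem maxBorder_le (l : List Int) : maxBorder l ≤ l.length - 1 :=
  Nat.findGreatest_le _

theorem border_zero (l : List Int) (h : 0 < l.length) : IsBorder l 0 :=
  ⟨h, by simp⟩

theorem maxBorder_isBorder (l : List Int) (h : 0 < l.length) : IsBorder l (maxBorder l) := by
  have h0 : ((l.take 0 == l.drop (l.length - 0)) = true) := by simp
  have hs := Nat.findGreatest_spec (P := fun k => (l.take k == l.drop (l.length - k)) = true)
    (n := l.length - 1) (Nat.zero_le _) h0
  refine ⟨by have := maxBorder_le l; omega, by simpa [maxBorder] using hs⟩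

theorem le_maxBorder (l : List Int) (k : Nat) (hk : IsBorder l k) : k ≤ maxBorder l :=
  Nat.le_findGreatest (by have := hk.1; omega) (by simpa using hk.2)

theorem maxBorder_eq_of (L : List Int) (t : Nat) (hbt : IsBorder L t)
    (hub : ∀ j, IsBorder L (j + 1) → j + 1 ≤ t) : maxBorder L = t := by
  have h1 : t ≤ maxBorder L := le_maxBorder _ _ hbt
  rcases Nat.eq_zero_or_pos (maxBorder L) with h0 | hpos
  · omega
  · have hbb := maxBorder_isBorder L (by have := hbt.1; omega)
    obtain ⟨j, hj⟩ : ∃ j, maxBorder L = j + 1 := ⟨maxBorder L - 1, by omega⟩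
    rw [hj] at hbb
    have := hub j hbb
    omega

-- a border of a border-prefix is a border
theorem border_comp1 (l : List Int) (k j : Nat) (hk : IsBorder l k)
    (hj : IsBorder (l.take k) j) : IsBorder l j := by
  obtain ⟨hk1, hk2⟩ := hk
  obtain ⟨hj1, hj2⟩ := hj
  have hlen : (l.take k).length = k := by simp; omega
  rw [hlen] at hj1 hj2
  refine ⟨by omega, ?_⟩
  have e1 : l.take j = (l.take k).take j := by
    rw [List.take_take]; congr 1; omega
  rw [e1, hj2, hk2, List.drop_drop]
  congr 1; omega

-- a shorter border is a border of the prefix cut at a longer border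
theorem border_comp2 (l : List Int) (k j : Nat) (hk : IsBorder l k)
    (hj : IsBorder l j) (hjk : j < k) : IsBorder (l.take k) j := by
  obtain ⟨hk1, hk2⟩ := hk
  obtain ⟨hj1, hj2⟩ := hj
  have hlen : (l.take k).length = k := by simp; omega
  refine ⟨by omega, ?_⟩
  rw [hlen]
  have e1 : (l.take k).take j = l.take j := by
    rw [List.take_take]; congr 1; omega
  rw [e1, hj2, hk2, List.drop_drop]
  congr 1; omega

-- borders of P ++ [x] of positive length, in terms of P
theorem border_append_iff (P : List Int) (x : Int) (j : Nat) (hj : j < P.length) :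
    IsBorder (P ++ [x]) (j + 1) ↔ (P.take j = P.drop (P.length - j) ∧ P.getD j 0 = x) := by
  unfold IsBorder
  have hlen : (P ++ [x]).length = P.length + 1 := by simp
  have hsub : P.length + 1 - (j + 1) = P.length - j := by omega
  have h1 : (P ++ [x]).take (j + 1) = P.take j ++ [P.getD j 0] := by
    rw [List.take_append_of_le_length (by omega), List.take_add_one,
      List.getElem?_eq_getElem hj, List.getD_eq_getElem P 0 hj]
    simp
  have h2 : (P ++ [x]).drop (P.length - j) = P.drop (P.length - j) ++ [x] :=
    List.drop_append_of_le_length (by omega)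
  constructor
  · rintro ⟨-, he⟩
    rw [hlen, hsub, h1, h2] at he
    have hinj := List.append_inj' he (by simp)
    exact ⟨hinj.1, by simpa using hinj.2⟩
  · rintro ⟨ha, hb⟩
    refine ⟨by simp; omega, ?_⟩
    rw [hlen, hsub, h1, h2, ha, hb]

theorem border_append_lt (P : List Int) (x : Int) (j : Nat)
    (h : IsBorder (P ++ [x]) (j + 1)) : j < P.length := by
  have := h.1; simp at this; omega

-- every positive border of P ++ [x] is at most maxBorder P + 1
theorem border_append_le_maxBorder (P : List Int) (x : Int) (j : Nat)
    (h : IsBorder (P ++ [x]) (j + 1)) : j ≤ maxBorder P := by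
  have hj := border_append_lt P x j h
  rcases Nat.eq_zero_or_pos j with h0 | hpos
  · omega
  · exact le_maxBorder P j ⟨hj, ((border_append_iff P x j hj).mp h).1⟩

theorem getD_take (l : List Int) (m t : Nat) (ht : t < m) (htl : t < l.length) :
    (l.take m).getD t 0 = l.getD t 0 := by
  rw [List.getD_eq_getElem _ _ (by simp; omega), List.getD_eq_getElem _ _ htl]
  exact List.getElem_take

theorem pvJump_zero (l : List Int) (pi : List Nat) (x : Int) :
    ∀ k, x ≠ l.getD (pvJump l pi x k) 0 → pvJump l pi x k = 0 := by
  intro k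
  induction k using Nat.strong_induction_on with
  | _ k ih =>
    intro h
    cases k with
    | zero => simp [pvJump]
    | succ k =>
      rw [pvJump] at h ⊢
      by_cases hx : x = l.getD (k + 1) 0
      · rw [if_pos hx] at h
        exact absurd hx h
      · rw [if_neg hx] at h ⊢
        exact ih _ (by omega) h

-- the KMP while-loop finds the longest border of (l.take m) ++ [x]
theorem pvJump_spec (l : List Int) (m : Nat) (pi : List Nat) (x : Int)
    (hm : 0 < m) (hmn : m ≤ l.length)
    (hpi : ∀ t, t < m → pi.getD t 0 = maxBorder (l.take (t + 1))) :
    ∀ k, (k = 0 ∨ IsBorder (l.take m) k) →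
      (∀ j, IsBorder (l.take m ++ [x]) (j + 1) → j ≤ k) →
      (x = l.getD (pvJump l pi x k) 0 →
        maxBorder (l.take m ++ [x]) = pvJump l pi x k + 1) ∧
      (x ≠ l.getD (pvJump l pi x k) 0 → maxBorder (l.take m ++ [x]) = 0) := by
  have hPlen : (l.take m).length = m := by simp; omega
  intro k
  induction k using Nat.strong_induction_on with
  | _ k ih =>
    intro hkb hmax
    cases k with
    | zero =>
      simp only [pvJump]
      constructor
      · intro hx
        apply maxBorder_eq_of
        · rw [border_append_iff _ _ 0 (by simp; omega)]
          refine ⟨by simp, ?_⟩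
          rw [getD_take l m 0 (by omega) (by omega)]
          exact hx.symm
        · intro j hbj
          have := hmax j hbj
          omega
      · intro hx
        apply maxBorder_eq_of
        · exact border_zero _ (by simp only [List.length_append, List.length_cons, List.length_nil]; omega)
        · intro j hbj
          exfalso
          have hj0 : j = 0 := by have := hmax j hbj; omega
          subst hj0
          have := ((border_append_iff _ _ 0 (by simp; omega)).mp hbj).2
          rw [getD_take l m 0 (by omega) (by omega)] at this
          exact hx this.symm
    | succ k =>
      have hkb' : IsBorder (l.take m) (k + 1) := by
        rcases hkb with h | h
        · omega
        · exact h
      have hkm : k + 1 < m := by have := hkb'.1; omega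
      by_cases hx : x = l.getD (k + 1) 0
      · have hpv : pvJump l pi x (k + 1) = k + 1 := by
          rw [pvJump, if_pos hx]
        rw [hpv]
        have hmb : maxBorder (l.take m ++ [x]) = k + 1 + 1 := by
          apply maxBorder_eq_of
          · rw [border_append_iff _ _ (k + 1) (by simp; omega)]
            refine ⟨hkb'.2, ?_⟩
            rw [getD_take l m (k + 1) hkm (by omega)]
            exact hx.symm
          · intro j hbj
            have := hmax j hbj
            omega
        exact ⟨fun _ => hmb, fun hc => absurd hx hc⟩
      · have hpik : pi.getD k 0 = maxBorder (l.take (k + 1)) := hpi k (by omega)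
        have hlen1 : (l.take (k + 1)).length = k + 1 := by simp; omega
        have hmble : maxBorder (l.take (k + 1)) ≤ k := by
          have := maxBorder_le (l.take (k + 1)); omega
        have hpv : pvJump l pi x (k + 1) = pvJump l pi x (maxBorder (l.take (k + 1))) := by
          rw [pvJump, if_neg hx]
          congr 1
          rw [hpik]
          omega
        rw [hpv]
        have he : l.take (k + 1) = (l.take m).take (k + 1) := by
          rw [List.take_take]; congr 1; omega
        apply ih (maxBorder (l.take (k + 1))) (by omega)
        · rcases Nat.eq_zero_or_pos (maxBorder (l.take (k + 1))) with h0 | hpos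
          · left; exact h0
          · right
            have hb : IsBorder ((l.take m).take (k + 1)) (maxBorder (l.take (k + 1))) := by
              rw [← he]
              exact maxBorder_isBorder _ (by omega)
            exact border_comp1 _ _ _ hkb' hb
        · intro j hbj
          have hjk := hmax j hbj
          have hjlt : j < (l.take m).length := border_append_lt _ _ _ hbj
          have hcond := (border_append_iff _ _ j hjlt).mp hbj
          have hne : j ≠ k + 1 := by
            intro hje
            apply hx
            have h2 := hcond.2
            rw [hje, getD_take l m (k + 1) hkm (by omega)] at h2
            exact h2.symm
          rcases Nat.eq_zero_or_pos j with h0 | hpos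
          · omega
          · have hbPj : IsBorder (l.take m) j := ⟨hjlt, hcond.1⟩
            have hb2 : IsBorder ((l.take m).take (k + 1)) j :=
              border_comp2 _ _ _ hkb' hbPj (by omega)
            rw [← he] at hb2
            have := le_maxBorder _ _ hb2
            omega

-- specification of the pi table
def piSpec (l : List Int) (m : Nat) : List Nat :=
  (List.range m).map (fun t => maxBorder (l.take (t + 1)))

theorem getD_piSpec (l : List Int) (m t : Nat) (ht : t < m) :
    (piSpec l m).getD t 0 = maxBorder (l.take (t + 1)) := by
  rw [piSpec, List.getD_eq_getElem _ _ (by simp; omega)]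
  simp

theorem take_succ_getD (l : List Int) (c : Nat) (hc : c < l.length) :
    l.take (c + 1) = l.take c ++ [l.getD c 0] := by
  rw [List.take_add_one, List.getElem?_eq_getElem hc, List.getD_eq_getElem _ _ hc]
  simp

theorem kmp_loop (l : List Int) (c : Nat) (hc : c + 1 ≤ l.length) :
    (List.range' 1 c).foldl (pvKmpStep l) ([0], 0) =
      (piSpec l (c + 1), maxBorder (l.take (c + 1))) := by
  induction c with
  | zero =>
    have h1 : (l.take 1).length = 1 := by simp; omega
    have hmb : maxBorder (l.take 1) = 0 := by
      have := maxBorder_le (l.take 1); omega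
    simp [piSpec, hmb]
  | succ c ihc =>
    have hc' : c + 1 ≤ l.length := by omega
    rw [List.range'_concat, List.foldl_append, ihc hc']
    have h1c : 1 + 1 * c = c + 1 := by ring
    simp only [List.foldl_cons, List.foldl_nil, h1c, pvKmpStep]
    have hlen1 : (l.take (c + 1)).length = c + 1 := by simp; omega
    have hk0 : maxBorder (l.take (c + 1)) = 0 ∨ IsBorder (l.take (c + 1)) (maxBorder (l.take (c + 1))) := by
      rcases Nat.eq_zero_or_pos (maxBorder (l.take (c + 1))) with h0 | hpos
      · left; exact h0
      · right; exact maxBorder_isBorder _ (by omega)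
    have hjs := pvJump_spec l (c + 1) (piSpec l (c + 1)) (l.getD (c + 1) 0)
      (by omega) (by omega)
      (fun t ht => getD_piSpec l (c + 1) t ht)
      (maxBorder (l.take (c + 1))) hk0
      (fun j hbj => border_append_le_maxBorder _ _ _ hbj)
    have htk : l.take (c + 1 + 1) = l.take (c + 1) ++ [l.getD (c + 1) 0] :=
      take_succ_getD l (c + 1) (by omega)
    rw [← htk] at hjs
    have hpis : piSpec l (c + 1 + 1) = piSpec l (c + 1) ++ [maxBorder (l.take (c + 1 + 1))] := by
      rw [piSpec, piSpec, List.range_succ, List.map_append]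
      rfl
    by_cases hx : l.getD (c + 1) 0 =
        l.getD (pvJump l (piSpec l (c + 1)) (l.getD (c + 1) 0) (maxBorder (l.take (c + 1)))) 0
    · rw [if_pos hx, hpis, hjs.1 hx]
    · have hz := pvJump_zero l (piSpec l (c + 1)) (l.getD (c + 1) 0) _ hx
      rw [if_neg hx, hpis, hjs.2 hx, hz]

-- characterization of port B
theorem alt_eq (l : List Int) (mp : Int) (h4 : 4 ≤ l.length) :
    find_modular_period_py_alt l mp =
      (if ((l.length : Int) - (maxBorder l : Int)) < min mp (PySem.Int.floordiv (l.length : Int) 2)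
       then ((l.length : Int) - (maxBorder l : Int)) else (l.length : Int)) := by
  simp only [find_modular_period_py_alt]
  rw [if_neg (by omega)]
  have hc : (l.length - 1) + 1 ≤ l.length := by omega
  rw [kmp_loop l (l.length - 1) hc]
  have hg : (piSpec l (l.length - 1 + 1)).getD (l.length - 1) 0 =
      maxBorder (l.take (l.length - 1 + 1)) :=
    getD_piSpec l _ _ (by omega)
  have hfull : l.take (l.length - 1 + 1) = l := by
    have : l.length - 1 + 1 = l.length := by omega
    rw [this, List.take_length]
  rw [hg, hfull]

-- A's inner loop is an ∀ over its range
theorem pvAInner_iff (l : List Int) (p : Int) (ps : List Int) :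
    pvAInner l p ps = true ↔
      ∀ i ∈ ps, PySem.List.pyGetD l i 0 = PySem.List.pyGetD l (i + p) 0 := by
  induction ps with
  | nil => simp [pvAInner]
  | cons i rest ihr =>
    simp only [pvAInner]
    by_cases h : PySem.List.pyGetD l i 0 = PySem.List.pyGetD l (i + p) 0
    · simp [h, ihr]
    · simp [h]

-- A's inner loop checks the take/drop (period) equation
theorem inner_iff (l : List Int) (p : Int) (h1 : 1 ≤ p) (h2 : p ≤ (l.length : Int)) :
    (pvAInner l p (PySem.List.pyRange 0 ((l.length : Int) - p) 1) = true) ↔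
      l.take (l.length - p.toNat) = l.drop p.toNat := by
  rw [pvAInner_iff]
  have hpn : p.toNat ≤ l.length := by omega
  constructor
  · intro h
    apply List.ext_getElem
    · simp
    · intro i hi1 hi2
      have hi : i < l.length - p.toNat := by simp at hi1; omega
      have hmem : (i : Int) ∈ PySem.List.pyRange 0 ((l.length : Int) - p) 1 := by
        rw [PySem.List.mem_pyRange_one]
        omega
      have he := h (i : Int) hmem
      have hc : (i : Int) + p = ((p.toNat + i : Nat) : Int) := by omega
      rw [hc, PySem.List.pyGetD_natCast, PySem.List.pyGetD_natCast] at he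
      rw [List.getD_eq_getElem _ _ (by omega), List.getD_eq_getElem _ _ (by omega)] at he
      rw [List.getElem_take, List.getElem_drop]
      exact he
  · intro h i hi
    rw [PySem.List.mem_pyRange_one] at hi
    obtain ⟨hi0, hilt⟩ := hi
    have hjt : i.toNat < l.length - p.toNat := by omega
    have hi' : i = ((i.toNat : Nat) : Int) := by omega
    rw [hi']
    have hc : ((i.toNat : Nat) : Int) + p = ((p.toNat + i.toNat : Nat) : Int) := by omega
    rw [hc, PySem.List.pyGetD_natCast, PySem.List.pyGetD_natCast]
    rw [List.getD_eq_getElem _ _ (by omega), List.getD_eq_getElem _ _ (by omega)]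
    have he := congrArg (fun t => t[i.toNat]?) h
    simp only [List.getElem?_take, List.getElem?_drop] at he
    rw [if_pos hjt] at he
    rw [List.getElem?_eq_getElem (by omega : i.toNat < l.length),
      List.getElem?_eq_getElem (by omega : p.toNat + i.toNat < l.length)] at he
    simpa using he

-- A's outer loop returns the minimal period if it lies in the range, else the length
theorem outer_eval_aux (l : List Int) (h4 : 4 ≤ l.length) :
    ∀ (fuel : Nat) (a b : Int), (b - a).toNat ≤ fuel →
      1 ≤ a → a ≤ ((l.length - maxBorder l : Nat) : Int) → b ≤ (l.length : Int) →
      pvAOuter l (PySem.List.pyRange a b 1) =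
        (if ((l.length - maxBorder l : Nat) : Int) < b
         then ((l.length - maxBorder l : Nat) : Int) else (l.length : Int)) := by
  have hmb : maxBorder l ≤ l.length - 1 := maxBorder_le l
  intro fuel
  induction fuel with
  | zero =>
    intro a b hf ha1 hap hb
    have hba : b ≤ a := by omega
    rw [PySem.List.pyRange_one_eq_nil hba]
    rw [if_neg (by omega)]
    rfl
  | succ f ihf =>
    intro a b hf ha1 hap hb
    by_cases hba : b ≤ a
    · rw [PySem.List.pyRange_one_eq_nil hba]
      rw [if_neg (by omega)]
      rfl
    · rw [Int.not_le] at hba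
      rw [PySem.List.pyRange_one_cons hba]
      show (if pvAInner l a (PySem.List.pyRange 0 ((l.length : Int) - a) 1) = true then a
        else pvAOuter l (PySem.List.pyRange (a + 1) b 1)) = _
      by_cases hEq : a = ((l.length - maxBorder l : Nat) : Int)
      · have hinner : pvAInner l a (PySem.List.pyRange 0 ((l.length : Int) - a) 1) = true := by
          rw [inner_iff l a ha1 (by omega)]
          have hbd := (maxBorder_isBorder l (by omega)).2
          have hat : a.toNat = l.length - maxBorder l := by omega
          rw [hat, show l.length - (l.length - maxBorder l) = maxBorder l from by omega]
          rw [show l.length - maxBorder l = l.length - maxBorder l from rfl] at hbd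
          exact hbd
        rw [if_pos hinner, if_pos (by omega), hEq]
      · have hlt : a < ((l.length - maxBorder l : Nat) : Int) := by omega
        have hinner : ¬ (pvAInner l a (PySem.List.pyRange 0 ((l.length : Int) - a) 1) = true) := by
          rw [inner_iff l a ha1 (by omega)]
          intro hper
          have hbord : IsBorder l (l.length - a.toNat) := by
            refine ⟨by omega, ?_⟩
            rw [show l.length - (l.length - a.toNat) = a.toNat from by omega]
            exact hper
          have := le_maxBorder l _ hbord
          omega
        rw [if_neg hinner]
        rw [ihf (a + 1) b (by omega) (by omega) (by omega) hb]

theorem outer_eval (l : List Int) (h4 : 4 ≤ l.length) (b : Int) (hb : b ≤ (l.length : Int)) :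
    pvAOuter l (PySem.List.pyRange 1 b 1) =
      (if ((l.length - maxBorder l : Nat) : Int) < b
       then ((l.length - maxBorder l : Nat) : Int) else (l.length : Int)) := by
  have hmb : maxBorder l ≤ l.length - 1 := maxBorder_le l
  exact outer_eval_aux l h4 (b - 1).toNat 1 b (by omega) (by omega) (by omega) hb

-- ===== VERDICT (by name: the statement is the Claim_ definition above) =====
theorem find_modular_period_py_spec : Claim_equal_find_modular_period_py := by
  intro l mp _
  unfold Spec_find_modular_period_py
  by_cases h4 : l.length < 4
  · simp [find_modular_period_py, find_modular_period_py_alt, h4]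
  · rw [Nat.not_lt] at h4
    rw [alt_eq l mp h4, find_modular_period_py, if_neg (by omega)]
    have hmb : maxBorder l ≤ l.length - 1 := maxBorder_le l
    have hfd : PySem.Int.floordiv (l.length : Int) 2 = ((l.length / 2 : Nat) : Int) := by
      exact_mod_cast PySem.Int.floordiv_natCast l.length 2
    have hbnd : min mp (PySem.Int.floordiv (l.length : Int) 2) ≤ (l.length : Int) := by
      have h2 : (l.length / 2 : Nat) ≤ l.length := Nat.div_le_self _ _
      calc min mp (PySem.Int.floordiv (l.length : Int) 2)
          ≤ PySem.Int.floordiv (l.length : Int) 2 := min_le_right _ _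
        _ = ((l.length / 2 : Nat) : Int) := hfd
        _ ≤ (l.length : Int) := by exact_mod_cast h2
    rw [outer_eval l h4 _ hbnd]
    have hcast : ((l.length - maxBorder l : Nat) : Int) = (l.length : Int) - (maxBorder l : Int) := by
      omega
    rw [hcast]
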